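-- pv_equiv track=rewrite | github.com/AltoPelago/aeon | scripts/stress-whitespace-mutations.py | split_cases
-- ===== SOURCE A (Python) =====
-- def split_cases(raw: str) -> list[str]:
--     cases: list[str] = []
--     current: list[str] = []
--     for line in raw.splitlines():
--         if line.strip() == "---":
--             snippet = "\n".join(current).strip()
--             if snippet:
--                 cases.append(snippet + "\n")
--             current = []
--             continue
--         current.append(line)
--     snippet = "\n".join(current).strip()
--     if snippet:
--         cases.append(snippet + "\n")
--     return cases
-- ===== SOURCE B (Python) =====
-- def _find_delim(lines, start):
--     # index of the next delimiter line at or after start, else None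
--     for i in range(start, len(lines)):
--         if lines[i].strip() == "---":
--             return i
--     return None
--
--
-- def split_cases(raw: str) -> list[str]:
--     # skip-scan: jump from delimiter to delimiter, slicing each segment out wholesale
--     lines = raw.splitlines()
--     cases: list[str] = []
--     start = 0
--     while True:
--         i = _find_delim(lines, start)
--         snippet = "\n".join(lines[start:] if i is None else lines[start:i]).strip()
--         if snippet:
--             cases.append(snippet + "\n")
--         if i is None:
--             return cases
--         start = i + 1
-- ===== Notes on version B (the rewrite author's own statement) =====
-- stated objective: alternative
-- what changed: Replaces A's per-line accumulate-and-flush loop (a 'current' buffer appended to line by line and flushed at each delimiter) with a skip-scan: repeatedly locate the index of the next '---' delimiter line and slice the whole segment lines[start:i] out at once, jumping start past each delimiter; no per-line accumulator exists.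
import Mathlib
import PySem

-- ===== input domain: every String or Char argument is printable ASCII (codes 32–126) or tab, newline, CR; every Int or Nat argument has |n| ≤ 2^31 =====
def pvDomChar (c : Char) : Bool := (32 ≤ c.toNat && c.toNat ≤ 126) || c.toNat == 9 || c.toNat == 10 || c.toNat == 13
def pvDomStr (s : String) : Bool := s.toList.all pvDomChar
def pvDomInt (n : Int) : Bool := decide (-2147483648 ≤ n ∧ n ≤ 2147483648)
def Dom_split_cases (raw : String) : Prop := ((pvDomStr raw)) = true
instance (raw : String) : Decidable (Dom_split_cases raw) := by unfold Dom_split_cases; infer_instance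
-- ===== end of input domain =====

-- B replaces A's per-line accumulate-and-flush loop with a skip-scan that jumps from
-- delimiter to delimiter and slices each segment out wholesale (alternative decomposition, same cost).

-- ===== PORT A =====
-- accumulate lines in `current`, flush at each '---' delimiter and at the end
def split_cases (raw : String) : List String :=
  let st := (PySem.Str.splitlines raw).foldl
    (fun (st : List String × List String) line =>
      if PySem.Str.strip line == "---" then
        let snippet := PySem.Str.strip (PySem.Str.join "\n" st.2)
        (if snippet ≠ "" then st.1 ++ [snippet ++ "\n"] else st.1, [])
      else
        (st.1, st.2 ++ [line]))
    ([], [])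
  let snippet := PySem.Str.strip (PySem.Str.join "\n" st.2)
  if snippet ≠ "" then st.1 ++ [snippet ++ "\n"] else st.1

-- ===== PORT B =====
-- index of the next delimiter line at or after start, else none (linear scan from start)
def findDelim (lines : List String) (start : Nat) : Option Nat :=
  (List.findIdx? (fun l => PySem.Str.strip l == "---") (lines.drop start)).map (· + start)

-- skip-scan loop: slice out lines[start:i] at each delimiter index i, jump start past it
def splitCasesGo (lines : List String) (start : Nat) (cases : List String) : List String :=
  match h : findDelim lines start with
  | none =>
      let snippet := PySem.Str.strip (PySem.Str.join "\n" (lines.drop start))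
      if snippet ≠ "" then cases ++ [snippet ++ "\n"] else cases
  | some i =>
      -- (Python's local variable `snippet` inlined)
      splitCasesGo lines (i + 1)
        (if PySem.Str.strip (PySem.Str.join "\n" ((lines.drop start).take (i - start))) ≠ "" then
          cases ++ [PySem.Str.strip (PySem.Str.join "\n" ((lines.drop start).take (i - start))) ++ "\n"]
        else cases)
termination_by lines.length - start
decreasing_by
  simp only [findDelim, Option.map_eq_some_iff] at h
  obtain ⟨rel, hrel, hi⟩ := h
  obtain ⟨hlt, -, -⟩ := List.findIdx?_eq_some_iff_getElem.mp hrel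
  simp only [List.length_drop] at hlt
  omega

def split_cases_alt (raw : String) : List String :=
  splitCasesGo (PySem.Str.splitlines raw) 0 []

-- ===== PRECONDITION & SPEC =====
def Spec_split_cases (raw : String) (out : List String) : Prop := out = split_cases_alt raw
instance (raw : String) (out : List String) : Decidable (Spec_split_cases raw out) := by unfold Spec_split_cases; infer_instance

-- ===== CLAIM (what is proved, stated in full; the proofs are below) =====
def Claim_equal_split_cases : Prop := ∀ (raw : String), Dom_split_cases raw → Spec_split_cases raw (split_cases raw)

-- ===== LEMMAS AND PROOFS =====

-- proof-only helpers: named copies of A's loop body and finisher, the segment emitter,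
-- and a recursive characterisation of segment splitting both programs are proved against
def pvAStep (st : List String × List String) (line : String) : List String × List String :=
  if PySem.Str.strip line == "---" then
    let snippet := PySem.Str.strip (PySem.Str.join "\n" st.2)
    (if snippet ≠ "" then st.1 ++ [snippet ++ "\n"] else st.1, [])
  else (st.1, st.2 ++ [line])

def pvAFinish (st : List String × List String) : List String :=
  let snippet := PySem.Str.strip (PySem.Str.join "\n" st.2)
  if snippet ≠ "" then st.1 ++ [snippet ++ "\n"] else st.1

def pvEmitB (seg : List String) : List String :=
  let snippet := PySem.Str.strip (PySem.Str.join "\n" seg)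
  if snippet ≠ "" then [snippet ++ "\n"] else []

def pvSeg : List String → List (List String)
  | [] => [[]]
  | l :: ls =>
      if PySem.Str.strip l == "---" then [] :: pvSeg ls
      else (l :: (pvSeg ls).headI) :: (pvSeg ls).tail

def pvPrep (cur : List String) : List (List String) → List (List String)
  | [] => [cur]
  | g :: t => (cur ++ g) :: t

lemma pvSeg_ne_nil (ls : List String) : pvSeg ls ≠ [] := by
  cases ls with
  | nil => simp [pvSeg]
  | cons l ls => simp only [pvSeg]; split <;> simp

lemma pvPrep_nil {gs : List (List String)} (h : gs ≠ []) : pvPrep [] gs = gs := by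
  cases gs with
  | nil => exact absurd rfl h
  | cons g t => simp [pvPrep]

lemma pvPrep_cons (cur : List String) (l : String) (gs : List (List String)) :
    pvPrep (cur ++ [l]) gs = (cur ++ (l :: gs.headI)) :: gs.tail := by
  cases gs with
  | nil => rfl
  | cons g t => simp [pvPrep, List.append_assoc]

-- A's loop invariant: flushing after the loop yields the already-emitted cases
-- followed by the emissions of the remaining segments (current buffer prepended)
lemma lemA (lines : List String) : ∀ (cases cur : List String),
    pvAFinish (lines.foldl pvAStep (cases, cur)) =
      cases ++ (pvPrep cur (pvSeg lines)).flatMap pvEmitB := by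
  induction lines with
  | nil =>
      intro cases cur
      by_cases h : PySem.Str.strip (PySem.Str.join "\n" cur) = "" <;>
        simp [pvAFinish, pvSeg, pvPrep, pvEmitB, h]
  | cons l ls ih =>
      intro cases cur
      by_cases hd : (PySem.Str.strip l == "---") = true
      · simp only [List.foldl_cons, pvAStep, hd, reduceIte]
        rw [ih, pvPrep_nil (pvSeg_ne_nil ls)]
        simp only [pvSeg, hd, reduceIte]
        by_cases h : PySem.Str.strip (PySem.Str.join "\n" cur) = "" <;>
          simp [pvPrep, pvEmitB, h, List.append_assoc]
      · simp only [List.foldl_cons, pvAStep, hd, Bool.false_eq_true, reduceIte]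
        rw [ih, pvPrep_cons]
        simp only [pvSeg, hd, Bool.false_eq_true, reduceIte, pvPrep]

-- a delimiter-free line list is a single segment
lemma pvSeg_no_delim (xs : List String)
    (h : ∀ l ∈ xs, (PySem.Str.strip l == "---") = false) : pvSeg xs = [xs] := by
  induction xs with
  | nil => rfl
  | cons l ls ih =>
      have hl := h l (by simp)
      simp only [pvSeg, hl, Bool.false_eq_true, reduceIte,
        ih (fun x hx => h x (by simp [hx]))]
      rfl

-- splitting at the first delimiter peels off one segment
lemma pvSeg_split (pre : List String) (d : String) (rest : List String)
    (hpre : ∀ l ∈ pre, (PySem.Str.strip l == "---") = false)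
    (hd : (PySem.Str.strip d == "---") = true) :
    pvSeg (pre ++ d :: rest) = pre :: pvSeg rest := by
  induction pre with
  | nil => simp [pvSeg, hd]
  | cons l ls ih =>
      have hl := hpre l (by simp)
      have := ih (fun x hx => hpre x (by simp [hx]))
      simp only [List.cons_append, pvSeg, hl, Bool.false_eq_true, reduceIte, this]
      rfl

-- B's loop computes exactly the emissions of the segments of the unprocessed suffix
lemma goB_eq (lines : List String) (start : Nat) (cases : List String) :
    splitCasesGo lines start cases =
      cases ++ (pvSeg (lines.drop start)).flatMap pvEmitB := by
  induction start, cases using splitCasesGo.induct (lines := lines) with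
  | case1 start cases h hs =>
    rw [splitCasesGo, h]
    simp only [findDelim, Option.map_eq_none_iff, List.findIdx?_eq_none_iff] at h
    rw [pvSeg_no_delim _ h]
    by_cases hc : PySem.Str.strip (PySem.Str.join "\n" (lines.drop start)) = "" <;>
      simp [pvEmitB, hc]
  | case2 start cases h hs =>
    rw [splitCasesGo, h]
    simp only [findDelim, Option.map_eq_none_iff, List.findIdx?_eq_none_iff] at h
    rw [pvSeg_no_delim _ h]
    by_cases hc : PySem.Str.strip (PySem.Str.join "\n" (lines.drop start)) = "" <;>
      simp [pvEmitB, hc]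
  | case3 start cases i h ih =>
    obtain ⟨rel, hrel, hi⟩ := Option.map_eq_some_iff.mp h
    obtain ⟨hlt, hdel, hbefore⟩ := List.findIdx?_eq_some_iff_getElem.mp hrel
    have ih2 := ih
    have hdecomp : lines.drop start =
        (lines.drop start).take rel ++ (lines.drop start)[rel] :: (lines.drop start).drop (rel + 1) := by
      rw [List.getElem_cons_drop, List.take_append_drop]
    have hpre : ∀ l ∈ (lines.drop start).take rel, (PySem.Str.strip l == "---") = false := by
      intro l hl
      obtain ⟨j, hj, rfl⟩ := List.mem_iff_getElem.mp hl
      have hj2 : j < rel := lt_of_lt_of_le hj (by simp)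
      rw [List.getElem_take]
      simpa using hbefore j hj2
    have hseg : pvSeg (lines.drop start) =
        (lines.drop start).take rel :: pvSeg ((lines.drop start).drop (rel + 1)) := by
      conv_lhs => rw [hdecomp]
      exact pvSeg_split _ _ _ hpre hdel
    have hdrop : lines.drop (i + 1) = (lines.drop start).drop (rel + 1) := by
      rw [List.drop_drop]; congr 1; omega
    have htake : i - start = rel := by omega
    rw [splitCasesGo, h]
    dsimp only
    rw [htake] at ih2 ⊢
    simp only [dite_eq_ite] at ih2
    rw [ih2, hdrop, hseg]
    by_cases hc : PySem.Str.strip (PySem.Str.join "\n" ((lines.drop start).take rel)) = "" <;>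
      simp [pvEmitB, hc, List.append_assoc]

-- ===== VERDICT (by name: the statement is the Claim_ definition above) =====
theorem split_cases_spec : Claim_equal_split_cases := by
  intro raw _
  show split_cases raw = split_cases_alt raw
  have hA := lemA (PySem.Str.splitlines raw) [] []
  simp only [List.nil_append] at hA
  have h1 : split_cases raw
      = (pvPrep [] (pvSeg (PySem.Str.splitlines raw))).flatMap pvEmitB := hA
  have h2 := goB_eq (PySem.Str.splitlines raw) 0 []
  simp only [List.drop_zero, List.nil_append] at h2
  rw [h1, pvPrep_nil (pvSeg_ne_nil _)]
  exact h2.symm
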